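-- pv_equiv track=rewrite | github.com/lamsterdam/TIP102_Pythn_Github | TIP102_Unit3/unit3_problem_set_2.py | terrain_elevation_match
-- ===== SOURCE A (Python) =====
-- def terrain_elevation_match(terrain):
--     smallest_avail = 0
--     largest_avail = len(terrain)
--     new_array = []
--     for i in range(len(terrain)):
--         if terrain[i] == "I":
--             new_array.append(smallest_avail)
--             smallest_avail += 1
--         else:
--             new_array.append(largest_avail)
--             largest_avail -= 1
--     new_array.append(smallest_avail)
--     return new_array
-- ===== SOURCE B (Python) =====
-- def terrain_elevation_match(terrain):
--     # Precompute a prefix-count table of the increase marker, then fill every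
--     # slot by a closed-form formula of (position, prefix count) instead of A's
--     # interleaved two-counter greedy.
--     n = len(terrain)
--     pre = [0]
--     k = 0
--     for c in terrain:
--         k += (c == "I")
--         pre.append(k)
--     return [pre[i] if c == "I" else n - i + pre[i]
--             for i, c in enumerate(terrain)] + [pre[n]]
-- ===== Notes on version B (the rewrite author's own statement) =====
-- stated objective: alternative
-- what changed: Replaces the stateful interleaved two-counter greedy with a precomputed prefix-count table plus a stateless closed-form fill: each slot's value is a direct formula of its position and the prefix count of increase markers, and the trailing slot is the total count.
import Mathlib
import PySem

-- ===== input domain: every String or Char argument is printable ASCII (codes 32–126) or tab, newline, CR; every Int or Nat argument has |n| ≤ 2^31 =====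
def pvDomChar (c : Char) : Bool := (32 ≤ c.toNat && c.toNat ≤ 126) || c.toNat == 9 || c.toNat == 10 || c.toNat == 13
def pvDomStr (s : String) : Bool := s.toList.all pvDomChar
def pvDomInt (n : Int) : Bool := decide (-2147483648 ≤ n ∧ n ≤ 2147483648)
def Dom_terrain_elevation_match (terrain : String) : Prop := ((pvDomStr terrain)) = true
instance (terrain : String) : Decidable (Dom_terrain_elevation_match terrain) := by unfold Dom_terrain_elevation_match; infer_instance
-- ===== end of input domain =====

-- B replaces A's running two-counter greedy by a stateless per-position closed form
-- from prefix counts of 'I' (objective: alternative; same return value, no speed claim).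

-- ===== PORT A =====
-- A's loop: state (smallest_avail, largest_avail, new_array)
def teLoopA : List Char → Int → Int → List Int → Int × Int × List Int
  | [], s, l, acc => (s, l, acc)
  | c :: rest, s, l, acc =>
    if c = 'I' then teLoopA rest (s + 1) l (acc ++ [s])
    else teLoopA rest s (l - 1) (acc ++ [l])

def terrain_elevation_match (terrain : String) : List Int :=
  let r := teLoopA terrain.toList 0 (terrain.toList.length : Int) []
  r.2.2 ++ [r.1]

-- ===== PORT B =====
-- prefix-count table: tePreList cs k lists the running counts after each char (pre[1:])
def tePreList : List Char → Int → List Int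
  | [], _ => []
  | c :: r, k =>
    let k' := k + (if c = 'I' then (1 : Int) else 0)
    k' :: tePreList r k'

def terrain_elevation_match_alt (terrain : String) : List Int :=
  let cs := terrain.toList
  let n := cs.length
  let pre : List Int := 0 :: tePreList cs 0
  ((List.range n).map (fun i =>
      if cs.getD i ' ' = 'I' then pre.getD i 0 else (n : Int) - (i : Int) + pre.getD i 0))
    ++ [pre.getD n 0]

-- ===== PRECONDITION & SPEC =====
def Spec_terrain_elevation_match (terrain : String) (out : List Int) : Prop := out = terrain_elevation_match_alt terrain
instance (terrain : String) (out : List Int) : Decidable (Spec_terrain_elevation_match terrain out) := by unfold Spec_terrain_elevation_match; infer_instance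

-- ===== CLAIM (what is proved, stated in full; the proofs are below) =====
def Claim_equal_terrain_elevation_match : Prop := ∀ (terrain : String), Dom_terrain_elevation_match terrain → Spec_terrain_elevation_match terrain (terrain_elevation_match terrain)

-- ===== LEMMAS AND PROOFS =====

-- the values A's loop emits, expressed positionally from prefix counts
def teG (cs : List Char) (s l : Int) : List Int :=
  (List.range cs.length).map (fun j =>
    if cs.getD j ' ' = 'I' then s + ((cs.take j).count 'I' : Int)
    else l - ((cs.take j).countP (fun c => !(c = 'I')) : Int))

lemma teG_cons_I (c : Char) (cs : List Char) (s l : Int) (h : c = 'I') :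
    teG (c :: cs) s l = s :: teG cs (s + 1) l := by
  unfold teG
  rw [List.length_cons, List.range_succ_eq_map, List.map_cons, List.map_map]
  congr 1
  · simp [h]
  · refine List.map_congr_left ?_
    intro j hj
    by_cases hg : cs.getD j ' ' = 'I' <;>
      simp [Function.comp, h, hg, List.count_cons, List.countP_cons] <;> push_cast <;> ring

lemma teG_cons_D (c : Char) (cs : List Char) (s l : Int) (h : ¬ c = 'I') :
    teG (c :: cs) s l = l :: teG cs s (l - 1) := by
  unfold teG
  rw [List.length_cons, List.range_succ_eq_map, List.map_cons, List.map_map]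
  congr 1
  · simp [h]
  · refine List.map_congr_left ?_
    intro j hj
    by_cases hg : cs.getD j ' ' = 'I' <;>
      simp [Function.comp, h, hg, List.count_cons, List.countP_cons] <;> push_cast <;> ring

lemma loopA_spec : ∀ (cs : List Char) (s l : Int) (acc : List Int),
    (teLoopA cs s l acc).2.2 ++ [(teLoopA cs s l acc).1]
      = acc ++ teG cs s l ++ [s + (cs.count 'I' : Int)] := by
  intro cs
  induction cs with
  | nil => intro s l acc; simp [teLoopA, teG]
  | cons c rest ih =>
    intro s l acc
    by_cases h : c = 'I'
    · rw [show teLoopA (c :: rest) s l acc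
            = teLoopA rest (s + 1) l (acc ++ [s]) by simp [teLoopA, h]]
      rw [ih, teG_cons_I c rest s l h]
      have : s + ((c :: rest).count 'I' : Int) = s + 1 + (rest.count 'I' : Int) := by
        simp [List.count_cons, h]; push_cast; ring
      rw [this]; simp
    · rw [show teLoopA (c :: rest) s l acc
            = teLoopA rest s (l - 1) (acc ++ [l]) by simp [teLoopA, h]]
      rw [ih, teG_cons_D c rest s l h]
      have : s + ((c :: rest).count 'I' : Int) = s + (rest.count 'I' : Int) := by
        simp [List.count_cons, h]
      rw [this]; simp

lemma countP_split (p : Char → Bool) (xs : List Char) :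
    xs.countP p + xs.countP (fun c => !p c) = xs.length := by
  induction xs with
  | nil => simp
  | cons x xs ih =>
    by_cases hx : p x <;> simp [List.countP_cons, hx] <;> omega

lemma preGet : ∀ (cs : List Char) (k : Int) (i : Nat), i ≤ cs.length →
    (k :: tePreList cs k).getD i 0 = k + ((cs.take i).count 'I' : Int) := by
  intro cs
  induction cs with
  | nil =>
    intro k i hi
    have h0 : i = 0 := Nat.le_zero.mp hi
    subst h0; simp
  | cons c r ih =>
    intro k i hi
    cases i with
    | zero => simp
    | succ j =>
      have hj : j ≤ r.length := by simpa using hi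
      have := ih (k + (if c = 'I' then (1 : Int) else 0)) j hj
      by_cases h : c = 'I' <;>
        simp_all [tePreList, List.count_cons, h] <;> push_cast <;> ring

lemma alt_eq (terrain : String) :
    terrain_elevation_match_alt terrain
      = teG terrain.toList 0 (terrain.toList.length : Int)
          ++ [(terrain.toList.count 'I' : Int)] := by
  unfold terrain_elevation_match_alt
  dsimp only
  congr 1
  · unfold teG
    refine List.map_congr_left ?_
    intro j hj
    have hjl : j < terrain.toList.length := List.mem_range.mp hj
    have hget := preGet terrain.toList 0 j (Nat.le_of_lt hjl)
    have htl : (terrain.toList.take j).length = j := by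
      rw [List.length_take]; omega
    have hsplit := countP_split (fun c => c = 'I') (terrain.toList.take j)
    have hcount : (terrain.toList.take j).count 'I'
        = (terrain.toList.take j).countP (fun c => decide (c = 'I')) :=
      List.countP_congr (fun a _ => by simp)
    rw [hget]
    split_ifs with h
    · omega
    · rw [hcount]
      omega
  · have hget := preGet terrain.toList 0 terrain.toList.length (Nat.le_refl _)
    simp_all [List.take_length]
    rw [show terrain.length = terrain.toList.length from by simp, List.take_length]

-- ===== VERDICT (by name: the statement is the Claim_ definition above) =====
theorem terrain_elevation_match_spec : Claim_equal_terrain_elevation_match := by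
  intro terrain _
  unfold Spec_terrain_elevation_match terrain_elevation_match
  rw [alt_eq, loopA_spec]
  simp
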